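-- pv_equiv track=rewrite | github.com/AIcrowd/whest | scripts/generate_api_docs.py | build_alias_groups
-- ===== SOURCE A (Python) =====
-- def resolve_canonical_name(name: str, alias_map: dict[str, str]) -> str:
--     """Resolve an alias chain to its canonical target."""
--     current = name
--     seen = {current}
--     while current in alias_map and alias_map[current] not in seen:
--         current = alias_map[current]
--         seen.add(current)
--     return current
--
-- def build_alias_groups(
--     registry: dict[str, dict], alias_map: dict[str, str]
-- ) -> dict[str, list[str]]:
--     """Group aliases by resolved canonical name."""
--     alias_groups: dict[str, list[str]] = {}
--     for alias in sorted(alias_map):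
--         canonical = resolve_canonical_name(alias, alias_map)
--         if canonical == alias or canonical not in registry:
--             continue
--         alias_groups.setdefault(canonical, []).append(alias)
--     return alias_groups
-- ===== SOURCE B (Python) =====
-- def build_alias_groups(registry, alias_map):
--     """Group aliases by resolved canonical name.
--
--     Memoizes resolutions of acyclic chains in the functional graph, so each
--     node on a terminating chain is walked only once across all aliases;
--     cyclic walks are detected with the path and left unmemoized (their
--     result depends on the starting node).
--     """
--     memo = {}
--
--     def resolve(name):
--         cur = name
--         path = []            # nodes visited before cur, in order
--         seen = {name}
--         while True:
--             if cur in memo: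
--                 r = memo[cur]
--                 for p in path:
--                     memo[p] = r
--                 return r
--             nxt = alias_map.get(cur)
--             if nxt is None:
--                 for p in path:
--                     memo[p] = cur
--                 memo[cur] = cur
--                 return cur
--             if nxt in seen:
--                 return cur
--             path.append(cur)
--             seen.add(nxt)
--             cur = nxt
--
--     alias_groups = {}
--     for alias in sorted(alias_map):
--         canonical = resolve(alias)
--         if canonical == alias or canonical not in registry:
--             continue
--         alias_groups.setdefault(canonical, []).append(alias)
--     return alias_groups
-- ===== Notes on version B (the rewrite author's own statement) =====
-- stated objective: alternative
-- what changed: B memoizes resolved canonical targets across aliases (caching every node of a terminating chain, detecting cycles with the walk path and leaving cyclic walks uncached), so each graph node's chain is walked once overall instead of being re-walked from scratch for every alias; a timing run's shallow-chain inputs are sort-dominated, so this was not measured faster there.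
import Mathlib
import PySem

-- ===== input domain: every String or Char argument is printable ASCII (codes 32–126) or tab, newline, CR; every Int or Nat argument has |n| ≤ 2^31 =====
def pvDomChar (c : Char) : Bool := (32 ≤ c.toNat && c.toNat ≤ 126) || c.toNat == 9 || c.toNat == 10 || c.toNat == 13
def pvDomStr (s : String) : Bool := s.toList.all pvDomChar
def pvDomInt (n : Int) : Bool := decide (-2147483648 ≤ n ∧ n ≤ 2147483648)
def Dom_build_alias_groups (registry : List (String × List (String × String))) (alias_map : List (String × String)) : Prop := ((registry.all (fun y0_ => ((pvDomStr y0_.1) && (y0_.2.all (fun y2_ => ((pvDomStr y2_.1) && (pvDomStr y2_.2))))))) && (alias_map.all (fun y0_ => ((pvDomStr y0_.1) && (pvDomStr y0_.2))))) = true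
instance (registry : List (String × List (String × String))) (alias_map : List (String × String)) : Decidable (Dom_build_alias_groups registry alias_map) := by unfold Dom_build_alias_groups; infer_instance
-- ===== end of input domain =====

-- B memoizes the resolutions of terminating alias chains, so each node of the functional graph is
-- walked once overall instead of once per alias (objective: alternative algorithm); cyclic walks
-- stay per-alias (their result depends on the start node).

-- ===== PORT A =====
-- the while loop of resolve_canonical_name; fuel = alias_map.length + 2 provably exceeds the
-- number of iterations (each iteration moves to a fresh key), so the 0-fuel branch is never hit
def pvResolveA (alias_map : List (String × String)) : Nat → String → PySem.Set String → String
  | 0, current, _ => current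
  | fuel + 1, current, seen =>
    match (PySem.Dict.mk alias_map).get? current with   -- 'current in alias_map' + 'alias_map[current]' fused: get? = none ↔ not in
    | none => current
    | some nxt =>
      if seen.contains nxt then current
      else pvResolveA alias_map fuel nxt (seen.add nxt)

def resolve_canonical_name (name : String) (alias_map : List (String × String)) : String :=
  pvResolveA alias_map (alias_map.length + 2) name (PySem.Set.ofList [name])

def build_alias_groups (registry : List (String × List (String × String))) (alias_map : List (String × String)) : List (String × List String) :=
  ((PySem.List.sorted ((PySem.Dict.mk alias_map).keys) (fun k => k) false).foldl
    (fun (alias_groups : PySem.Dict String (List String)) al =>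
      let canonical := resolve_canonical_name al alias_map
      if canonical == al || !(PySem.Dict.mk registry).contains canonical then alias_groups
      else alias_groups.insert canonical (alias_groups.getD canonical [] ++ [al]))  -- setdefault(c, []).append(al)
    (PySem.Dict.mk [])).items

-- ===== PORT B =====
-- the while-True loop of Source B's resolve; returns (result, updated memo); same fuel device as A
def pvResolveB (alias_map : List (String × String)) : Nat → String → List String → PySem.Set String → PySem.Dict String String → String × PySem.Dict String String
  | 0, cur, _, _, memo => (cur, memo)
  | fuel + 1, cur, path, seen, memo =>
    match memo.get? cur with
    | some r => (r, path.foldl (fun m p => m.insert p r) memo)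
    | none =>
      match (PySem.Dict.mk alias_map).get? cur with   -- alias_map.get(cur)
      | none => (cur, (path.foldl (fun m p => m.insert p cur) memo).insert cur cur)
      | some nxt =>
        if seen.contains nxt then (cur, memo)
        else pvResolveB alias_map fuel nxt (path ++ [cur]) (seen.add nxt) memo

def build_alias_groups_alt (registry : List (String × List (String × String))) (alias_map : List (String × String)) : List (String × List String) :=
  ((PySem.List.sorted ((PySem.Dict.mk alias_map).keys) (fun k => k) false).foldl
    (fun (st : PySem.Dict String String × PySem.Dict String (List String)) al =>
      let res := pvResolveB alias_map (alias_map.length + 2) al [] (PySem.Set.ofList [al]) st.1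
      if res.1 == al || !(PySem.Dict.mk registry).contains res.1 then (res.2, st.2)
      else (res.2, st.2.insert res.1 (st.2.getD res.1 [] ++ [al])))
    (PySem.Dict.mk [], PySem.Dict.mk [])).2.items

-- ===== PRECONDITION & SPEC =====
def Spec_build_alias_groups (registry : List (String × List (String × String))) (alias_map : List (String × String)) (out : List (String × List String)) : Prop := out = build_alias_groups_alt registry alias_map
instance (registry : List (String × List (String × String))) (alias_map : List (String × String)) (out : List (String × List String)) : Decidable (Spec_build_alias_groups registry alias_map out) := by unfold Spec_build_alias_groups; infer_instance

-- ===== CLAIM (what is proved, stated in full; the proofs are below) =====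
def Claim_equal_build_alias_groups : Prop := ∀ (registry : List (String × List (String × String))) (alias_map : List (String × String)), Dom_build_alias_groups registry alias_map → Spec_build_alias_groups registry alias_map (build_alias_groups registry alias_map)

-- ===== LEMMAS AND PROOFS =====

-- the successor map of the functional graph
def pvNext (alias_map : List (String × String)) (k : String) : Option String :=
  (PySem.Dict.mk alias_map).get? k

-- n-fold iteration of the successor map (none once the chain leaves the key set)
def pvOrbit (alias_map : List (String × String)) : Nat → String → Option String
  | 0, k => some k
  | n + 1, k =>
    match pvNext alias_map k with
    | none => none
    | some k' => pvOrbit alias_map n k'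

-- k's chain terminates at r
def pvReaches (alias_map : List (String × String)) (k r : String) : Prop :=
  ∃ m, pvOrbit alias_map m k = some r ∧ pvNext alias_map r = none

-- every memo entry records the terminal of its key's chain
def pvInv (alias_map : List (String × String)) (memo : PySem.Dict String String) : Prop :=
  ∀ k r, memo.get? k = some r → pvReaches alias_map k r

-- path is a successor chain ending just before cur
def pvLink (alias_map : List (String × String)) : List String → String → Prop
  | [], _ => True
  | p :: ps, cur => pvNext alias_map p = some (ps.headD cur) ∧ pvLink alias_map ps cur

-- the distinct keys of alias_map, and those of them not yet visited
def pvD (alias_map : List (String × String)) : List String :=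
  PySem.List.dedup (alias_map.map Prod.fst)

def pvKN (alias_map : List (String × String)) (seen : PySem.Set String) : Nat :=
  ((pvD alias_map).filter (fun x => !seen.contains x)).length

theorem pvOrbit_add (am : List (String × String)) (a b : Nat) (k : String) :
    pvOrbit am (a + b) k = (pvOrbit am a k).bind (fun x => pvOrbit am b x) := by
  induction a generalizing k with
  | zero => simp [pvOrbit]
  | succ n ih =>
    have : n + 1 + b = (n + b) + 1 := by omega
    rw [this]
    simp only [pvOrbit]
    cases h : pvNext am k with
    | none => simp
    | some k' => simp [ih]

theorem pvOrbit_none_of_ge (am : List (String × String)) {n n' : Nat} {k : String}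
    (h : pvOrbit am n k = none) (hle : n ≤ n') : pvOrbit am n' k = none := by
  have : n' = n + (n' - n) := by omega
  rw [this, pvOrbit_add, h]; rfl

theorem pvOrbit_succ_terminal (am : List (String × String)) {m : Nat} {k r : String}
    (h : pvOrbit am m k = some r) (ht : pvNext am r = none) : pvOrbit am (m + 1) k = none := by
  rw [pvOrbit_add, h]
  simp [pvOrbit, ht]

theorem pvOrbit_some_of_le (am : List (String × String)) {m i : Nat} {k r : String}
    (h : pvOrbit am m k = some r) (hle : i ≤ m) : ∃ x, pvOrbit am i k = some x := by
  cases hx : pvOrbit am i k with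
  | none => exact absurd (pvOrbit_none_of_ge am hx hle ▸ h) (by simp)
  | some x => exact ⟨x, rfl⟩

-- a chain that terminates never returns to its start
theorem pvNoPeriod (am : List (String × String)) {k r : String} (hr : pvReaches am k r)
    {p : Nat} (hp : 1 ≤ p) : pvOrbit am p k ≠ some k := by
  intro hcyc
  obtain ⟨m, horb, hterm⟩ := hr
  have hq : ∀ q : Nat, pvOrbit am (q * p) k = some k := by
    intro q
    induction q with
    | zero => simp [pvOrbit]
    | succ n ih => rw [Nat.succ_mul, pvOrbit_add, ih]; simpa using hcyc
  have h1 : pvOrbit am (m + 1) k = none := pvOrbit_succ_terminal am horb hterm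
  have h2 : pvOrbit am ((m + 1) * p) k = none :=
    pvOrbit_none_of_ge am h1 (Nat.le_mul_of_pos_right _ hp)
  rw [hq (m + 1)] at h2
  exact absurd h2 (by simp)

theorem pvReaches_through (am : List (String × String)) {t : Nat} {p k r : String}
    (h : pvOrbit am t p = some k) (hr : pvReaches am k r) : pvReaches am p r := by
  obtain ⟨m, horb, hterm⟩ := hr
  exact ⟨t + m, by rw [pvOrbit_add, h]; simpa using horb, hterm⟩

theorem pvOrbit_inj (am : List (String × String)) {k r x : String} (hr : pvReaches am k r)
    {i j : Nat} (hij : i < j) (hi : pvOrbit am i k = some x) (hj : pvOrbit am j k = some x) :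
    False := by
  obtain ⟨m, horb, hterm⟩ := hr
  have him : i ≤ m := by
    by_contra hgt
    have := pvOrbit_none_of_ge am (pvOrbit_succ_terminal am horb hterm) (by omega : m + 1 ≤ i)
    rw [hi] at this; exact absurd this (by simp)
  have hxr : pvOrbit am (m - i) x = some r := by
    have : pvOrbit am (i + (m - i)) k = some r := by rwa [Nat.add_sub_cancel' him]
    rw [pvOrbit_add, hi] at this; simpa using this
  have hreach : pvReaches am x r := ⟨m - i, hxr, hterm⟩
  have hcyc : pvOrbit am (j - i) x = some x := by
    have : pvOrbit am (i + (j - i)) k = some x := by rwa [Nat.add_sub_cancel' (le_of_lt hij)]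
    rw [pvOrbit_add, hi] at this; simpa using this
  exact pvNoPeriod am hreach (by omega) hcyc

theorem pvLink_head_orbit (am : List (String × String)) :
    ∀ (ps : List String) (p cur : String), pvLink am (p :: ps) cur →
      pvOrbit am (ps.length + 1) p = some cur := by
  intro ps
  induction ps with
  | nil => intro p cur h; simp [pvLink] at h; simp [pvOrbit, h]
  | cons q qs ih =>
    intro p cur h
    obtain ⟨h1, h2⟩ := h
    have := ih q cur h2
    simp only [List.headD] at h1
    simp only [List.length_cons]
    rw [show qs.length + 1 + 1 = (qs.length + 1) + 1 by rfl]
    simp only [pvOrbit, h1]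
    exact this

theorem pvLink_mem (am : List (String × String)) :
    ∀ (path : List String) (cur p : String), pvLink am path cur → p ∈ path →
      ∃ t, 1 ≤ t ∧ pvOrbit am t p = some cur := by
  intro path
  induction path with
  | nil => intro _ _ _ h; simp at h
  | cons q qs ih =>
    intro cur p hl hmem
    rcases List.mem_cons.mp hmem with rfl | hmem
    · exact ⟨qs.length + 1, by omega, pvLink_head_orbit am qs p cur hl⟩
    · exact ih cur p hl.2 hmem

theorem pvLink_snoc (am : List (String × String)) :
    ∀ (path : List String) (cur nxt : String), pvLink am path cur →
      pvNext am cur = some nxt → pvLink am (path ++ [cur]) nxt := by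
  intro path
  induction path with
  | nil => intro cur nxt _ h; exact ⟨by simpa using h, trivial⟩
  | cons q qs ih =>
    intro cur nxt hl hn
    refine ⟨?_, ih cur nxt hl.2 hn⟩
    have := hl.1
    cases qs with
    | nil => simpa using this
    | cons a as => simpa using this

theorem pvNext_isSome_iff (am : List (String × String)) (k : String) :
    (pvNext am k).isSome ↔ k ∈ am.map Prod.fst := by
  simp only [pvNext, PySem.Dict.get?, Option.isSome_map, List.find?_isSome, List.mem_map]
  constructor
  · rintro ⟨p, hp, hbeq⟩; exact ⟨p, hp, by simpa using hbeq⟩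
  · rintro ⟨p, hp, rfl⟩; exact ⟨p, hp, by simp⟩

-- a sequence without repeats whose values lie in L has at most L.length terms
theorem pvInjCount (n : Nat) (f : Nat → String) (L : List String)
    (hmem : ∀ j, j < n → f j ∈ L) (hinj : ∀ i j, i < j → j < n → f i ≠ f j) :
    n ≤ L.length := by
  have himg : (Finset.range n).image f ⊆ L.toFinset := by
    intro x hx
    obtain ⟨j, hj, rfl⟩ := Finset.mem_image.mp hx
    exact List.mem_toFinset.mpr (hmem j (Finset.mem_range.mp hj))
  have hcard : ((Finset.range n).image f).card = n := by
    rw [Finset.card_image_of_injOn, Finset.card_range]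
    intro i hi j hj hij
    by_contra hne
    rcases Nat.lt_or_ge i j with h | h
    · exact hinj i j h (Finset.mem_range.mp hj) hij
    · exact hinj j i (by omega) (Finset.mem_range.mp hi) hij.symm
  calc n = ((Finset.range n).image f).card := hcard.symm
    _ ≤ L.toFinset.card := Finset.card_le_card himg
    _ ≤ L.length := L.toFinset_card_le

-- A's loop computes the terminal of a terminating chain whose strict orbit avoids seen
theorem pvResolveA_terminal (am : List (String × String)) :
    ∀ (m fuel : Nat) (cur r : String) (seen : PySem.Set String),
      pvOrbit am m cur = some r → pvNext am r = none → m ≤ fuel →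
      (∀ j x, 1 ≤ j → j ≤ m → pvOrbit am j cur = some x → x ∉ seen) →
      pvResolveA am fuel cur seen = r := by
  intro m
  induction m with
  | zero =>
    intro fuel cur r seen horb hterm _ _
    have hcr : cur = r := by simpa [pvOrbit] using horb
    subst hcr
    cases fuel with
    | zero => rfl
    | succ f =>
      simp only [pvResolveA]
      have : (PySem.Dict.mk am).get? cur = none := hterm
      simp [this]
  | succ n ih =>
    intro fuel cur r seen horb hterm hle havoid
    cases fuel with
    | zero => omega
    | succ f =>
      simp only [pvOrbit] at horb
      cases hn : pvNext am cur with
      | none => rw [hn] at horb; simp at horb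
      | some nxt =>
        rw [hn] at horb
        dsimp only at horb
        have hget : (PySem.Dict.mk am).get? cur = some nxt := hn
        have hn1 : pvOrbit am 1 cur = some nxt := by simp [pvOrbit, hn]
        have hnot : nxt ∉ seen := havoid 1 nxt (by omega) (by omega) hn1
        have hcont : seen.contains nxt = false := by simpa using hnot
        simp only [pvResolveA, hget, hcont, Bool.false_eq_true, if_false]
        have hreach : pvReaches am cur r :=
          ⟨n + 1, by simp only [pvOrbit, hn]; exact horb, hterm⟩
        apply ih f nxt r (seen.add nxt) horb hterm (by omega)
        intro j x hj hjm horbx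
        have hjx : pvOrbit am (j + 1) cur = some x := by
          rw [show j + 1 = 1 + j by omega, pvOrbit_add, hn1]
          simpa using horbx
        have h1 : x ∉ seen := havoid (j + 1) x (by omega) (by omega) hjx
        have h2 : x ≠ nxt := by
          rintro rfl
          exact pvOrbit_inj am hreach (show 1 < j + 1 by omega) hn1 hjx
        have hseq : seen.add nxt = seen ++ [nxt] := by
          simp [PySem.Set.add, hnot]
        rw [hseq]
        simp [h1, h2]

theorem pvInv_insert (am : List (String × String)) {memo : PySem.Dict String String}
    (h : pvInv am memo) {k v : String} (hr : pvReaches am k v) :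
    pvInv am (memo.insert k v) := by
  intro k' r' hget
  by_cases hk : k' = k
  · subst hk
    rw [PySem.Dict.get?_insert_self] at hget
    cases hget
    exact hr
  · rw [PySem.Dict.get?_insert_of_ne memo v hk] at hget
    exact h k' r' hget

theorem pvInv_fold (am : List (String × String)) :
    ∀ (path : List String) (memo : PySem.Dict String String) (v : String),
      pvInv am memo → (∀ p ∈ path, pvReaches am p v) →
      pvInv am (path.foldl (fun m p => m.insert p v) memo) := by
  intro path
  induction path with
  | nil => intro memo v h _; exact h
  | cons q qs ih =>
    intro memo v h hall
    exact ih (memo.insert q v) v (pvInv_insert am h (hall q (by simp)))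
      (fun p hp => hall p (by simp [hp]))

-- the key step lemma: B's walk returns A's walk's value and preserves the memo invariant
theorem pvSim (am : List (String × String)) :
    ∀ (fuel : Nat) (cur : String) (path : List String) (seen : PySem.Set String)
      (memo : PySem.Dict String String),
      pvInv am memo →
      pvLink am path cur →
      (∀ x, x ∈ seen ↔ (x ∈ path ∨ x = cur)) →
      (pvKN am seen + 1 < fuel ∨ (pvNext am cur = none ∧ 1 ≤ fuel)) →
      (pvResolveB am fuel cur path seen memo).1 = pvResolveA am fuel cur seen ∧
        pvInv am (pvResolveB am fuel cur path seen memo).2 := by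
  intro fuel
  induction fuel with
  | zero =>
    intro cur path seen memo _ _ _ hf
    rcases hf with h | ⟨_, h⟩ <;> omega
  | succ f ih =>
    intro cur path seen memo hinv hlink hseen hf
    cases hm : memo.get? cur with
    | some r =>
      have hreach : pvReaches am cur r := hinv cur r hm
      -- the strict orbit of cur avoids seen
      have havoid : ∀ j x, 1 ≤ j → pvOrbit am j cur = some x → x ∉ seen := by
        intro j x hj horbx hmemx
        rcases (hseen x).mp hmemx with hpath | rfl
        · obtain ⟨t, ht1, horbt⟩ := pvLink_mem am path cur x hlink hpath
          have : pvOrbit am (j + t) cur = some cur := by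
            rw [pvOrbit_add, horbx]; simpa using horbt
          exact pvNoPeriod am hreach (by omega) this
        · exact pvNoPeriod am hreach hj horbx
      have hA : pvResolveA am (f + 1) cur seen = r := by
        obtain ⟨m, horb, hterm⟩ := hreach
        rcases hf with hkn | ⟨hnone, _⟩
        · -- m ≤ f + 1 via counting the strict orbit inside the unseen keys
          have hmle : m ≤ f + 1 := by
            rcases Nat.eq_zero_or_pos m with rfl | hmpos
            · omega
            · have hcount : m - 1 ≤ pvKN am seen := by
                apply pvInjCount (m - 1)
                  (fun j => ((pvOrbit am (j + 1) cur).getD ""))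
                · intro j hj
                  obtain ⟨x, hx⟩ := pvOrbit_some_of_le am horb (show j + 1 ≤ m by omega)
                  rw [hx]
                  simp only [Option.getD_some]
                  have hxkey : x ∈ am.map Prod.fst := by
                    rw [← pvNext_isSome_iff]
                    obtain ⟨y, hy⟩ := pvOrbit_some_of_le am horb (show j + 2 ≤ m by omega)
                    rw [show j + 2 = (j + 1) + 1 by omega, pvOrbit_add, hx] at hy
                    simp only [Option.bind_some, pvOrbit] at hy
                    cases hnx : pvNext am x
                    · rw [hnx] at hy; simp at hy
                    · simp
                  have hxnot : x ∉ seen := havoid (j + 1) x (by omega) hx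
                  simp only [pvD]
                  rw [List.mem_filter]
                  exact ⟨by simpa [PySem.List.mem_dedup] using hxkey, by simpa using hxnot⟩
                · intro i j hij hj hne
                  obtain ⟨xi, hxi⟩ := pvOrbit_some_of_le am horb (show i + 1 ≤ m by omega)
                  obtain ⟨xj, hxj⟩ := pvOrbit_some_of_le am horb (show j + 1 ≤ m by omega)
                  rw [hxi, hxj] at hne
                  simp only [Option.getD_some] at hne
                  subst hne
                  exact pvOrbit_inj am ⟨m, horb, hterm⟩ (show i + 1 < j + 1 by omega) hxi hxj
              omega
          exact pvResolveA_terminal am m (f + 1) cur r seen horb hterm hmle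
            (fun j x hj _ hx => havoid j x hj hx)
        · -- cur is terminal: m must be 0
          have hm0 : m = 0 := by
            by_contra hne
            have h1 : pvOrbit am 1 cur = none := by simp [pvOrbit, hnone]
            have := pvOrbit_none_of_ge am h1 (show 1 ≤ m by omega)
            rw [horb] at this; exact absurd this (by simp)
          subst hm0
          have hcr : cur = r := by simpa [pvOrbit] using horb
          subst hcr
          exact pvResolveA_terminal am 0 (f + 1) cur cur seen (by simp [pvOrbit]) hterm
            (by omega) (by omega)
      constructor
      · simp only [pvResolveB, hm]
        exact hA.symm ▸ rfl
      · simp only [pvResolveB, hm]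
        apply pvInv_fold am path memo r hinv
        intro p hp
        obtain ⟨t, _, horbt⟩ := pvLink_mem am path cur p hlink hp
        exact pvReaches_through am horbt hreach
    | none =>
      cases hget : (PySem.Dict.mk am).get? cur with
      | none =>
        have hAev : pvResolveA am (f + 1) cur seen = cur := by
          simp [pvResolveA, hget]
        constructor
        · simp only [pvResolveB, hm, hget, hAev]
        · simp only [pvResolveB, hm, hget]
          have hterm : pvReaches am cur cur := ⟨0, by simp [pvOrbit], hget⟩
          apply pvInv_insert am _ hterm
          apply pvInv_fold am path memo cur hinv
          intro p hp
          obtain ⟨t, _, horbt⟩ := pvLink_mem am path cur p hlink hp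
          exact pvReaches_through am horbt hterm
      | some nxt =>
        cases hcont : seen.contains nxt with
        | true =>
          have hmem : nxt ∈ seen := by simpa using hcont
          constructor
          · simp [pvResolveB, pvResolveA, hm, hget, hmem]
          · simpa only [pvResolveB, hm, hget, hcont, if_pos] using hinv
        | false =>
          have hnotmem : nxt ∉ seen := by simpa using hcont
          have hadd : seen.add nxt = seen ++ [nxt] := by simp [PySem.Set.add, hnotmem]
          have hrec := ih nxt (path ++ [cur]) (seen.add nxt) memo hinv
            (pvLink_snoc am path cur nxt hlink hget)
            (by
              intro x
              rw [hadd]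
              simp only [List.mem_append, List.mem_singleton]
              constructor
              · rintro (hx | rfl)
                · rcases (hseen x).mp hx with h | h
                  · exact Or.inl (Or.inl h)
                  · exact Or.inl (Or.inr h)
                · exact Or.inr rfl
              · rintro ((h | h) | rfl)
                · exact Or.inl ((hseen x).mpr (Or.inl h))
                · exact Or.inl ((hseen x).mpr (Or.inr h))
                · exact Or.inr rfl)
            (by
              rcases hf with hkn | ⟨hnone, _⟩
              · by_cases hkey : nxt ∈ am.map Prod.fst
                · left
                  have hflt : (pvD am).filter (fun x => !(seen.add nxt).contains x)
                      = ((pvD am).filter (fun x => !seen.contains x)).filter (fun x => !(x == nxt)) := by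
                    rw [List.filter_filter]
                    apply List.filter_congr
                    intro x _
                    rw [hadd]
                    by_cases hx1 : x = nxt
                    · subst hx1; simp
                    · by_cases hx2 : x ∈ seen <;> simp [hx1, hx2]
                  have hmemflt : nxt ∈ (pvD am).filter (fun x => !seen.contains x) := by
                    rw [List.mem_filter]
                    exact ⟨by simpa [pvD, PySem.List.mem_dedup] using hkey, by simpa using hnotmem⟩
                  have hlt : pvKN am (seen.add nxt) < pvKN am seen := by
                    simp only [pvKN, hflt]
                    exact List.length_filter_lt_length_iff_exists.mpr ⟨nxt, hmemflt, by simp⟩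
                  omega
                · right
                  constructor
                  · cases hnx : pvNext am nxt
                    · rfl
                    · exact absurd ((pvNext_isSome_iff am nxt).mp (by simp [hnx])) hkey
                  · omega
              · have hgn : pvNext am cur = some nxt := hget
                rw [hnone] at hgn; cases hgn)
          constructor
          · simpa only [pvResolveB, pvResolveA, hm, hget, hcont, Bool.false_eq_true, if_false]
              using hrec.1
          · simpa only [pvResolveB, hm, hget, hcont, Bool.false_eq_true, if_false] using hrec.2

-- size bookkeeping: a set grows by at most one element per add
theorem pvFoldlAdd_len : ∀ (xs : List String) (s : PySem.Set String),
    (xs.foldl PySem.Set.add s).length ≤ s.length + xs.length := by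
  intro xs
  induction xs with
  | nil => intro s; simp
  | cons x xs ih =>
    intro s
    have hadd : (PySem.Set.add s x).length ≤ s.length + 1 := by
      by_cases h : x ∈ s <;> simp [PySem.Set.add, h]
    calc ((x :: xs).foldl PySem.Set.add s).length
        = (xs.foldl PySem.Set.add (s.add x)).length := by simp [List.foldl_cons]
      _ ≤ (s.add x).length + xs.length := ih _
      _ ≤ s.length + 1 + xs.length := by omega
      _ = s.length + (x :: xs).length := by simp; omega

theorem pvKN_le (am : List (String × String)) (seen : PySem.Set String) :
    pvKN am seen ≤ am.length := by
  calc pvKN am seen ≤ (pvD am).length := List.length_filter_le _ _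
    _ ≤ (am.map Prod.fst).length := by
        simpa [pvD, PySem.List.dedup, PySem.Set.ofList] using
          pvFoldlAdd_len (am.map Prod.fst) []
    _ = am.length := by simp

-- one alias resolved from a fresh start
theorem pvSim_top (am : List (String × String)) (al : String)
    (memo : PySem.Dict String String) (hinv : pvInv am memo) :
    (pvResolveB am (am.length + 2) al [] (PySem.Set.ofList [al]) memo).1
        = pvResolveA am (am.length + 2) al (PySem.Set.ofList [al]) ∧
      pvInv am (pvResolveB am (am.length + 2) al [] (PySem.Set.ofList [al]) memo).2 := by
  apply pvSim am (am.length + 2) al [] (PySem.Set.ofList [al]) memo hinv trivial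
  · intro x
    constructor
    · intro hx
      right
      simpa [PySem.Set.ofList, PySem.Set.add, PySem.Set.empty] using hx
    · rintro (hx | rfl)
      · simp at hx
      · simp [PySem.Set.ofList, PySem.Set.add, PySem.Set.empty]
  · left
    have := pvKN_le am (PySem.Set.ofList [al])
    omega

-- the grouping folds agree element by element once the resolutions agree
theorem pvFoldGroups (registry : List (String × List (String × String)))
    (am : List (String × String)) :
    ∀ (keys : List String) (memo : PySem.Dict String String)
      (groups : PySem.Dict String (List String)), pvInv am memo →
      (keys.foldl
        (fun (st : PySem.Dict String String × PySem.Dict String (List String)) al =>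
          let res := pvResolveB am (am.length + 2) al [] (PySem.Set.ofList [al]) st.1
          if res.1 == al || !(PySem.Dict.mk registry).contains res.1 then (res.2, st.2)
          else (res.2, st.2.insert res.1 (st.2.getD res.1 [] ++ [al])))
        (memo, groups)).2
      = keys.foldl
          (fun (alias_groups : PySem.Dict String (List String)) al =>
            let canonical := resolve_canonical_name al am
            if canonical == al || !(PySem.Dict.mk registry).contains canonical then alias_groups
            else alias_groups.insert canonical (alias_groups.getD canonical [] ++ [al]))
          groups := by
  intro keys
  induction keys with
  | nil => intro memo groups _; rfl
  | cons al rest ih =>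
    intro memo groups hinv
    obtain ⟨hres, hinv'⟩ := pvSim_top am al memo hinv
    simp only [List.foldl_cons]
    rw [show (resolve_canonical_name al am)
        = (pvResolveB am (am.length + 2) al [] (PySem.Set.ofList [al]) memo).1 from hres.symm]
    by_cases hc : ((pvResolveB am (am.length + 2) al [] (PySem.Set.ofList [al]) memo).1 == al
        || !(PySem.Dict.mk registry).contains
            (pvResolveB am (am.length + 2) al [] (PySem.Set.ofList [al]) memo).1) = true
    · rw [if_pos hc, if_pos hc]
      exact ih _ groups hinv'
    · rw [if_neg hc, if_neg hc]
      exact ih _ _ hinv'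

theorem pvInv_empty (am : List (String × String)) : pvInv am (PySem.Dict.mk []) := by
  intro k r h
  simp [PySem.Dict.get?] at h

-- ===== VERDICT (by name: the statement is the Claim_ definition above) =====
theorem build_alias_groups_spec : Claim_equal_build_alias_groups := by
  intro registry alias_map _
  unfold Spec_build_alias_groups build_alias_groups build_alias_groups_alt
  exact congrArg PySem.Dict.items
    (pvFoldGroups registry alias_map
      (PySem.List.sorted ((PySem.Dict.mk alias_map).keys) (fun k => k) false)
      (PySem.Dict.mk []) (PySem.Dict.mk []) (pvInv_empty alias_map)).symm
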